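-- pv_equiv track=rewrite | github.com/lo-tp/leetcode | string/686RepeatedStringMatch.py | repeatedStringMatchTLE
-- ===== SOURCE A (Python) =====
-- def repeatedStringMatchTLE(A, B):
--     res, start_index, size_a, size_b = 1, 0, len(A), len(B)
--     while start_index < size_a:
--         i, j = start_index, 0
--         while j < size_b and A[i] == B[j]:
--             i += 1
--             j += 1
--             if i == size_a and j < size_b:
--                 i = 0
--                 res += 1
--         if j == size_b:
--             return res
--         res = 1
--         start_index += 1
--     return -1
-- ===== SOURCE B (Python) =====
-- def repeatedStringMatchTLE(A, B):
--     if not A: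
--         return -1
--     q = -(-len(B) // len(A)) if B else 1
--     if B in A * q:
--         return q
--     if B in A * (q + 1):
--         return q + 1
--     return -1
-- ===== Notes on version B (the rewrite author's own statement) =====
-- stated objective: faster
-- what changed: Replaces the char-by-char scan over every start offset (with a wrap counter) by building A repeated ceil(|B|/|A|) and ceil(|B|/|A|)+1 times and using Python's built-in substring test, returning the smaller repeat count that contains B.
import Mathlib
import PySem

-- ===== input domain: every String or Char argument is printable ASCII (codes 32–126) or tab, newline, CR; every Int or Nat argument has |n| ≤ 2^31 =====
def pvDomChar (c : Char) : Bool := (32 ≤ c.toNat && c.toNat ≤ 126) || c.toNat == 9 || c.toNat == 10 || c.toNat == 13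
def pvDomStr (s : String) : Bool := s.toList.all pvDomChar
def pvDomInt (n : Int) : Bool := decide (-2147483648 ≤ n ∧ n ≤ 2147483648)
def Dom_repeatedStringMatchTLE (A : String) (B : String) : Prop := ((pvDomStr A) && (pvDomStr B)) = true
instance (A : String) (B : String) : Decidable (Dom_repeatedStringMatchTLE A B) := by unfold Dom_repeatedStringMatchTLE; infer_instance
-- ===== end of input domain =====

-- B replaces A's per-offset character scan by two built-in substring tests on A repeated
-- ceil(|B|/|A|) and ceil(|B|/|A|)+1 times (objective: faster — library search, no Python-level inner loop).

-- ===== PORT A =====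
-- inner while loop: i = current index into A (wraps to 0, bumping res), remaining suffix of B plays j
def pvInner (a : List Char) (sa : Nat) : Nat → Int → List Char → Bool × Int
  | _, res, [] => (true, res)
  | i, res, c :: rest =>
    if a[i]? = some c then
      if i + 1 = sa ∧ rest ≠ [] then pvInner a sa 0 (res + 1) rest
      else pvInner a sa (i + 1) res rest
    else (false, res)

-- outer while loop over start_index
def pvOuter (a b : List Char) (sa : Nat) (start : Nat) : Int :=
  if start < sa then
    match pvInner a sa start 1 b with
    | (true, res) => res
    | (false, _) => pvOuter a b sa (start + 1)
  else -1
termination_by sa - start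

def repeatedStringMatchTLE (A : String) (B : String) : Int :=
  pvOuter A.toList B.toList A.toList.length 0

-- ===== PORT B =====
def repeatedStringMatchTLE_alt (A : String) (B : String) : Int :=
  let a := A.toList
  let b := B.toList
  if a.isEmpty then -1
  else
    let q : Int := if b.isEmpty then 1 else -(PySem.Int.floordiv (-(b.length : Int)) (a.length : Int))
    if PySem.Chars.isIn b (PySem.List.pyRepeat a q) then q
    else if PySem.Chars.isIn b (PySem.List.pyRepeat a (q + 1)) then q + 1
    else -1

-- ===== PRECONDITION & SPEC =====
def Spec_repeatedStringMatchTLE (A : String) (B : String) (out : Int) : Prop := out = repeatedStringMatchTLE_alt A B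
instance (A : String) (B : String) (out : Int) : Decidable (Spec_repeatedStringMatchTLE A B out) := by unfold Spec_repeatedStringMatchTLE; infer_instance

-- ===== CLAIM (what is proved, stated in full; the proofs are below) =====
def Claim_equal_repeatedStringMatchTLE : Prop := ∀ (A : String) (B : String), Dom_repeatedStringMatchTLE A B → Spec_repeatedStringMatchTLE A B (repeatedStringMatchTLE A B)

-- ===== LEMMAS AND PROOFS =====

-- b matches the infinite repetition of a starting at offset s
def pvOcc (a b : List Char) (s : Nat) : Prop := ∀ j < b.length, b[j]? = a[(s + j) % a.length]?

-- number of wraps performed by A's inner loop (copies touched minus one)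
def pvW (sa s n : Nat) : Nat := if n = 0 then 0 else (s + n - 1) / sa

lemma pvInner_spec (a : List Char) (b : List Char) : ∀ (i : Nat) (res : Int), i < a.length →
    (pvOcc a b i → pvInner a a.length i res b = (true, res + (pvW a.length i b.length : Int))) ∧
    (¬ pvOcc a b i → (pvInner a a.length i res b).1 = false) := by
  induction b with
  | nil =>
    intro i res hi
    refine ⟨fun _ => by simp [pvInner, pvW], fun h => absurd (fun j hj => by simp at hj) h⟩
  | cons c rest ih =>
    intro i res hi
    have hsa : 0 < a.length := lt_of_le_of_lt (Nat.zero_le i) hi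
    have hi0 : (i + 0) % a.length = i := by rw [Nat.add_zero, Nat.mod_eq_of_lt hi]
    by_cases hc : a[i]? = some c
    · have hocc_iff : pvOcc a (c :: rest) i ↔ pvOcc a rest ((i + 1) % a.length) := by
        constructor
        · intro h j hj
          have h1 := h (j + 1) (by simpa using Nat.succ_lt_succ hj)
          simp only [List.getElem?_cons_succ] at h1
          rw [Nat.mod_add_mod, show (i + 1) + j = i + (j + 1) from by omega]
          exact h1
        · intro h j hj
          cases j with
          | zero => simpa [Nat.mod_eq_of_lt hi] using hc.symm
          | succ j' =>
            have h1 := h j' (by simpa using Nat.lt_of_succ_lt_succ hj)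
            rw [Nat.mod_add_mod, show (i + 1) + j' = i + (j' + 1) from by omega] at h1
            simpa using h1
      by_cases hbr : i + 1 = a.length ∧ rest ≠ []
      · have hrest : rest ≠ [] := hbr.2
        have hn : 0 < rest.length := List.length_pos_iff.mpr hrest
        have hmod : (i + 1) % a.length = 0 := by rw [hbr.1, Nat.mod_self]
        have hstep : pvInner a a.length i res (c :: rest) = pvInner a a.length 0 (res + 1) rest := by
          simp [pvInner, hc, hbr.1, hrest]
        have hW : (pvW a.length i (c :: rest).length : Int) = 1 + (pvW a.length 0 rest.length : Int) := by
          have e1 : i + (rest.length + 1) - 1 = (rest.length - 1) + a.length := by omega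
          simp only [pvW, List.length_cons, if_neg (by omega : ¬ rest.length + 1 = 0),
            if_neg (by omega : ¬ rest.length = 0), e1, Nat.add_div_right _ hsa, Nat.zero_add]
          push_cast; omega
        obtain ⟨ht, hf⟩ := ih 0 (res + 1) hsa
        rw [hocc_iff, hmod]
        constructor
        · intro h; rw [hstep, ht h, hW]; congr 1; omega
        · intro h; rw [hstep]; exact hf h
      · by_cases hrest : rest = []
        · subst hrest
          have hocc : pvOcc a [c] i := by
            intro j hj
            have hj0 : j = 0 := by simp at hj; omega
            subst hj0
            simpa [Nat.mod_eq_of_lt hi] using hc.symm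
          constructor
          · intro _
            have : pvW a.length i 1 = 0 := by
              simp [pvW, Nat.div_eq_of_lt hi]
            simp [pvInner, hc, this]
          · intro h; exact absurd hocc h
        · have hlt : i + 1 < a.length := by
            rcases Nat.lt_or_ge (i + 1) a.length with h | h
            · exact h
            · exact absurd ⟨by omega, hrest⟩ hbr
          have hmod : (i + 1) % a.length = i + 1 := Nat.mod_eq_of_lt hlt
          have hn : 0 < rest.length := List.length_pos_iff.mpr hrest
          have hstep : pvInner a a.length i res (c :: rest) = pvInner a a.length (i + 1) res rest := by
            simp [pvInner, hc, hbr]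
          have hW : pvW a.length i (c :: rest).length = pvW a.length (i + 1) rest.length := by
            simp only [pvW, List.length_cons, if_neg (by omega : ¬ rest.length + 1 = 0), if_neg (by omega : ¬ rest.length = 0)]
            congr 1; omega
          obtain ⟨ht, hf⟩ := ih (i + 1) res hlt
          rw [hocc_iff, hmod]
          constructor
          · intro h; rw [hstep, ht h, hW]
          · intro h; rw [hstep]; exact hf h
    · have hnocc : ¬ pvOcc a (c :: rest) i := by
        intro h
        have := h 0 (by simp)
        simp only [List.getElem?_cons_zero, hi0] at this
        exact hc this.symm
      refine ⟨fun h => absurd h hnocc, fun _ => by simp [pvInner, hc]⟩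

lemma pvOuter_none (a b : List Char) : ∀ start : Nat,
    (∀ s, start ≤ s → s < a.length → ¬ pvOcc a b s) → pvOuter a b a.length start = -1 := by
  have key : ∀ (fuel start : Nat), a.length - start ≤ fuel →
      (∀ s, start ≤ s → s < a.length → ¬ pvOcc a b s) → pvOuter a b a.length start = -1 := by
    intro fuel
    induction fuel with
    | zero =>
      intro start hle _
      rw [pvOuter, if_neg (by omega)]
    | succ fuel ih =>
      intro start hle h
      by_cases hlt : start < a.length
      · obtain ⟨_, hf⟩ := pvInner_spec a b start 1 hlt
        have hfst := hf (h start le_rfl hlt)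
        rw [pvOuter, if_pos hlt]
        rcases hinner : pvInner a a.length start 1 b with ⟨fst, snd⟩
        rw [hinner] at hfst
        simp only at hfst
        subst hfst
        exact ih (start + 1) (by omega) (fun s hs1 hs2 => h s (by omega) hs2)
      · rw [pvOuter, if_neg hlt]
  exact fun start h => key (a.length - start) start le_rfl h

lemma pvOuter_first (a b : List Char) : ∀ (start s : Nat), start ≤ s → s < a.length →
    pvOcc a b s → (∀ t, start ≤ t → t < s → ¬ pvOcc a b t) →
    pvOuter a b a.length start = 1 + (pvW a.length s b.length : Int) := by
  have key : ∀ (fuel start s : Nat), a.length - start ≤ fuel → start ≤ s → s < a.length →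
      pvOcc a b s → (∀ t, start ≤ t → t < s → ¬ pvOcc a b t) →
      pvOuter a b a.length start = 1 + (pvW a.length s b.length : Int) := by
    intro fuel
    induction fuel with
    | zero => intro start s hle hss hs _ _; omega
    | succ fuel ih =>
      intro start s hle hss hs hocc hmin
      have hlt : start < a.length := lt_of_le_of_lt hss hs
      rw [pvOuter, if_pos hlt]
      by_cases heq : start = s
      · subst heq
        obtain ⟨ht, _⟩ := pvInner_spec a b start 1 hlt
        rw [ht hocc]
      · obtain ⟨_, hf⟩ := pvInner_spec a b start 1 hlt
        have hfst := hf (hmin start le_rfl (by omega))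
        rcases hinner : pvInner a a.length start 1 b with ⟨fst, snd⟩
        rw [hinner] at hfst
        simp only at hfst
        subst hfst
        exact ih (start + 1) s (by omega) (by omega) hs hocc (fun t ht1 ht2 => hmin t (by omega) ht2)
  exact fun start s h1 h2 h3 h4 => key (a.length - start) start s le_rfl h1 h2 h3 h4

lemma pvRepeat_length (a : List Char) (k : Nat) : (PySem.List.pyRepeat a (k : Int)).length = k * a.length := by
  simp [PySem.List.pyRepeat, List.length_flatten, List.map_replicate, List.sum_replicate, smul_eq_mul]

lemma pvFlatRep_getElem? (a : List Char) : ∀ (k t : Nat), t < k * a.length →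
    (List.replicate k a).flatten[t]? = a[t % a.length]? := by
  intro k
  induction k with
  | zero => intro t ht; omega
  | succ k ih =>
    intro t ht
    rw [List.replicate_succ, List.flatten_cons]
    by_cases hlt : t < a.length
    · rw [List.getElem?_append_left hlt, Nat.mod_eq_of_lt hlt]
    · rw [Nat.not_lt] at hlt
      have hm : (k + 1) * a.length = k * a.length + a.length := by ring
      rw [List.getElem?_append_right hlt, ih (t - a.length) (by omega),
        Nat.mod_eq_sub_mod hlt]

lemma pvRepeat_getElem? (a : List Char) (k t : Nat) (ht : t < k * a.length) :
    (PySem.List.pyRepeat a (k : Int))[t]? = a[t % a.length]? := by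
  simpa [PySem.List.pyRepeat] using pvFlatRep_getElem? a k t ht

lemma pvPrefix_drop_iff (b T : List Char) (hb : b ≠ []) (t : Nat) :
    b <+: T.drop t ↔ t + b.length ≤ T.length ∧ ∀ j < b.length, b[j]? = T[t + j]? := by
  have hn : 0 < b.length := List.length_pos_iff.mpr hb
  constructor
  · intro h
    have hlen : b.length ≤ T.length - t := by simpa using h.length_le
    have hle : t + b.length ≤ T.length := by omega
    refine ⟨hle, fun j hj => ?_⟩
    rw [List.prefix_iff_eq_take.mp h, List.getElem?_take_of_lt hj, List.getElem?_drop]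
  · rintro ⟨hle, h⟩
    rw [List.prefix_iff_eq_take]
    apply List.ext_getElem?
    intro j
    by_cases hj : j < b.length
    · rw [List.getElem?_take_of_lt hj, List.getElem?_drop, h j hj]
    · rw [Nat.not_lt] at hj
      rw [List.getElem?_eq_none hj, List.getElem?_eq_none (le_trans (by simp) hj)]

lemma pvIsIn_repeat_iff (a b : List Char) (ha : a ≠ []) (hb : b ≠ []) (k : Nat) :
    PySem.Chars.isIn b (PySem.List.pyRepeat a (k : Int)) = true ↔
      ∃ s, s < a.length ∧ pvOcc a b s ∧ s + b.length ≤ k * a.length := by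
  have hsa : 0 < a.length := List.length_pos_iff.mpr ha
  rw [← PySem.Chars.exists_prefix_drop_iff_isIn]
  constructor
  · rintro ⟨t, hpre⟩
    rw [pvPrefix_drop_iff _ _ hb] at hpre
    obtain ⟨hle, h⟩ := hpre
    rw [pvRepeat_length] at hle
    refine ⟨t % a.length, Nat.mod_lt _ hsa, fun j hj => ?_, ?_⟩
    · rw [h j hj, pvRepeat_getElem? a k _ (by omega), Nat.mod_add_mod]
    · have := Nat.mod_le t a.length
      omega
  · rintro ⟨s, _, hocc, hle⟩
    refine ⟨s, ?_⟩
    rw [pvPrefix_drop_iff _ _ hb]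
    refine ⟨by rw [pvRepeat_length]; omega, fun j hj => ?_⟩
    rw [pvRepeat_getElem? a k _ (by omega), hocc j hj]

lemma pvCeil_eq (n sa : Nat) (hn : 1 ≤ n) (hsa : 1 ≤ sa) :
    -(PySem.Int.floordiv (-(n : Int)) (sa : Int)) = (((n - 1) / sa + 1 : Nat) : Int) := by
  have h1 : (n - 1) / sa * sa < n := by
    have := Nat.div_mul_le_self (n - 1) sa
    omega
  have h2 : n ≤ ((n - 1) / sa + 1) * sa := by
    have hlt : n - 1 < (n - 1) / sa * sa + sa := Nat.lt_div_mul_add (by omega)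
    calc n ≤ (n - 1) / sa * sa + sa := by omega
      _ = ((n - 1) / sa + 1) * sa := by ring
  rw [PySem.Int.neg_floordiv_neg_eq_iff_of_pos (by exact_mod_cast hsa)]
  have hcast : (((n - 1) / sa + 1 : Nat) : Int) - 1 = (((n - 1) / sa : Nat) : Int) := by
    push_cast; ring
  refine ⟨?_, by exact_mod_cast h2⟩
  rw [hcast]
  exact_mod_cast h1

-- ===== VERDICT (by name: the statement is the Claim_ definition above) =====
theorem repeatedStringMatchTLE_spec : Claim_equal_repeatedStringMatchTLE := by
  intro A B _
  show repeatedStringMatchTLE A B = repeatedStringMatchTLE_alt A B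
  simp only [repeatedStringMatchTLE, repeatedStringMatchTLE_alt]
  generalize A.toList = a
  generalize B.toList = b
  by_cases hA : a = []
  · subst hA
    rw [pvOuter]
    simp
  · have hsa : 0 < a.length := List.length_pos_iff.mpr hA
    rw [if_neg (by simpa using hA)]
    by_cases hB : b = []
    · subst hB
      rw [if_pos (by simp), pvOuter, if_pos hsa]
      simp [pvInner]
    · have hn : 0 < b.length := List.length_pos_iff.mpr hB
      have hq : (if b.isEmpty = true then (1 : Int)
            else -PySem.Int.floordiv (-(b.length : Int)) (a.length : Int))
          = (((b.length - 1) / a.length + 1 : Nat) : Int) := by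
        rw [if_neg (by simpa using hB), pvCeil_eq b.length a.length hn hsa]
      rw [hq]
      have hcast1 : ((((b.length - 1) / a.length + 1 : Nat) : Int)) + 1
          = (((b.length - 1) / a.length + 1 + 1 : Nat) : Int) := by push_cast; ring
      rw [hcast1]
      -- abbreviations (plain terms, no lets)
      have hnQ : b.length ≤ ((b.length - 1) / a.length + 1) * a.length := by
        have hlt : b.length - 1 < (b.length - 1) / a.length * a.length + a.length :=
          Nat.lt_div_mul_add hsa
        calc b.length ≤ (b.length - 1) / a.length * a.length + a.length := by omega
          _ = ((b.length - 1) / a.length + 1) * a.length := by ring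
      by_cases hex : ∃ s, s < a.length ∧ pvOcc a b s
      · haveI : DecidablePred (fun s => s < a.length ∧ pvOcc a b s) :=
          fun _ => Classical.propDecidable _
        obtain ⟨hs0lt, hs0occ⟩ := Nat.find_spec hex
        have hfirst := pvOuter_first a b 0 (Nat.find hex) (Nat.zero_le _) hs0lt hs0occ
          (fun t _ ht2 hocc => Nat.find_min hex ht2 ⟨lt_trans ht2 hs0lt, hocc⟩)
        rw [hfirst]
        have hmem1 : PySem.Chars.isIn b
            (PySem.List.pyRepeat a ((((b.length - 1) / a.length + 1 : Nat) : Int))) = true ↔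
            Nat.find hex + b.length ≤ ((b.length - 1) / a.length + 1) * a.length := by
          rw [pvIsIn_repeat_iff a b hA hB]
          constructor
          · rintro ⟨s, hs, hocc, hle⟩
            have hmin : Nat.find hex ≤ s := Nat.find_min' hex ⟨hs, hocc⟩
            omega
          · intro h
            exact ⟨Nat.find hex, hs0lt, hs0occ, h⟩
        have hmem2 : PySem.Chars.isIn b
            (PySem.List.pyRepeat a ((((b.length - 1) / a.length + 1 + 1 : Nat) : Int))) = true := by
          rw [pvIsIn_repeat_iff a b hA hB]
          refine ⟨Nat.find hex, hs0lt, hs0occ, ?_⟩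
          have he : ((b.length - 1) / a.length + 1 + 1) * a.length
              = ((b.length - 1) / a.length + 1) * a.length + a.length := by ring
          omega
        by_cases hle : Nat.find hex + b.length ≤ ((b.length - 1) / a.length + 1) * a.length
        · rw [if_pos (hmem1.mpr hle)]
          have hdiv : (Nat.find hex + b.length - 1) / a.length = (b.length - 1) / a.length := by
            apply le_antisymm
            · have := (Nat.div_lt_iff_lt_mul hsa).mpr
                (show Nat.find hex + b.length - 1 < ((b.length - 1) / a.length + 1) * a.length by omega)
              omega
            · exact Nat.div_le_div_right (by omega)
          rw [pvW, if_neg (by omega), hdiv]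
          push_cast
          ring
        · rw [if_neg (fun h => hle (hmem1.mp h)), if_pos hmem2]
          have hub : (Nat.find hex + b.length - 1) / a.length ≤ (b.length - 1) / a.length + 1 := by
            have he : ((b.length - 1) / a.length + 1 + 1) * a.length
                = ((b.length - 1) / a.length + 1) * a.length + a.length := by ring
            have := (Nat.div_lt_iff_lt_mul hsa).mpr
              (show Nat.find hex + b.length - 1 < ((b.length - 1) / a.length + 1 + 1) * a.length by omega)
            omega
          have hlb : (b.length - 1) / a.length + 1 ≤ (Nat.find hex + b.length - 1) / a.length := by
            rw [Nat.le_div_iff_mul_le hsa]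
            have he : ((b.length - 1) / a.length + 1) * a.length ≤ Nat.find hex + b.length - 1 := by omega
            exact he
          rw [pvW, if_neg (by omega), le_antisymm hub hlb]
          push_cast
          ring
      · have hnone : ∀ s, (0:Nat) ≤ s → s < a.length → ¬ pvOcc a b s := by
          intro s _ hs hocc
          exact hex ⟨s, hs, hocc⟩
        rw [pvOuter_none a b 0 hnone]
        have hf1 : PySem.Chars.isIn b
            (PySem.List.pyRepeat a ((((b.length - 1) / a.length + 1 : Nat) : Int))) ≠ true := by
          intro h
          rw [pvIsIn_repeat_iff a b hA hB] at h
          obtain ⟨s, hs, hocc, -⟩ := h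
          exact hex ⟨s, hs, hocc⟩
        have hf2 : PySem.Chars.isIn b
            (PySem.List.pyRepeat a ((((b.length - 1) / a.length + 1 + 1 : Nat) : Int))) ≠ true := by
          intro h
          rw [pvIsIn_repeat_iff a b hA hB] at h
          obtain ⟨s, hs, hocc, -⟩ := h
          exact hex ⟨s, hs, hocc⟩
        rw [if_neg hf1, if_neg hf2]
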